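-- pv_equiv track=rewrite | github.com/yuju-lee/algorithm-study | day1-12.py | solve_string_explosion
-- ===== SOURCE A (Python) =====
-- def solve_string_explosion(text, bomb) -> str:
--     stack = []
--     bomb_len = len(bomb)
--     last_char = bomb[-1]  # 폭발 문자열의 마지막 문자 / 마지막 문자는 검사 안하게끔
--
--     for char in text:
--         stack.append(char)
--
--         # 현재 문자가 폭발 문자열의 마지막 문자와 같고
--         # 스택의 길이가 폭발 문자열 길이보다 길 때만 검사
--         if char == last_char and len(stack) >= bomb_len:
--             # 스택의 마지막 부분이 폭발 문자열과 일치하는지 확인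
--             if ''.join(stack[-bomb_len:]) == bomb:
--                 # 폭발 문자열 길이만큼 스택에서 제거
--                 del stack[-bomb_len:]
--
--     # 남은 문자들 리턴
--     return ''.join(stack) if stack else "FRULA"
-- ===== SOURCE B (Python) =====
-- def solve_string_explosion(text, bomb) -> str:
--     # Repeatedly delete the leftmost occurrence of bomb until none remains.
--     while True:
--         i = text.find(bomb)
--         if i < 0:
--             break
--         text = text[:i] + text[i + len(bomb):]
--     return text if text else "FRULA"
-- ===== Notes on version B (the rewrite author's own statement) =====
-- stated objective: simpler
-- what changed: The single-pass character stack with per-character suffix checks is replaced by a short loop that repeatedly finds the leftmost occurrence of bomb and deletes it by slicing until none remains.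
import Mathlib
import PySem

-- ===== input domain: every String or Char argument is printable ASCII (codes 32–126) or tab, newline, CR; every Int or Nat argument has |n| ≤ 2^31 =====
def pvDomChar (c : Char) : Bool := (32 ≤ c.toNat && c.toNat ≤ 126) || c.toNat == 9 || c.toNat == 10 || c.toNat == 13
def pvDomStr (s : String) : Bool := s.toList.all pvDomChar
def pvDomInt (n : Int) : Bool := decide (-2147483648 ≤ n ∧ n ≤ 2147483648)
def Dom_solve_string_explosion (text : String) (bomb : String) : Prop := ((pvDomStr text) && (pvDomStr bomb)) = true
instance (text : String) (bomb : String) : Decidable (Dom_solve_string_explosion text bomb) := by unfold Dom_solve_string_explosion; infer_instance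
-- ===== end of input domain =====

-- ===== PORT A =====
-- B replaces A's one-pass character stack by repeated deletion of the leftmost bomb
-- occurrence (find + slicing) until none remains; same return value, no side effects.

-- helper for A: the body of A's `for char in text` loop (append, then conditional suffix deletion)
def pvStepA (bomb : List Char) (last_char : Char) (stack : List Char) (char : Char) : List Char :=
  let stack := stack ++ [char]
  if char = last_char ∧ (bomb.length : Int) ≤ (stack.length : Int) then
    if PySem.List.slice stack (some (-(bomb.length : Int))) none = bomb then
      -- del stack[-bomb_len:]  ==  stack = stack[:-bomb_len]
      PySem.List.slice stack none (some (-(bomb.length : Int)))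
    else stack
  else stack

def solve_string_explosion (text : String) (bomb : String) : String :=
  match PySem.Str.pyGet? bomb (-1) with          -- last_char = bomb[-1]
  | none => ""                                    -- bomb = "": Python raises IndexError; excluded by Pre_
  | some last_char =>
    let stack := text.toList.foldl (pvStepA bomb.toList last_char) []
    if stack = [] then "FRULA" else String.ofList stack   -- ''.join(stack) if stack else "FRULA"

-- ===== PORT B =====
-- helper for B: the `while True: i = text.find(bomb); if i < 0: break; text = text[:i] + text[i+len(bomb):]`
-- loop; fuel = |text| + 1 bounds the iteration count (each deletion shortens text), making the port total.
def pvLoopB (bomb : List Char) : Nat → List Char → List Char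
  | 0, text => text
  | fuel + 1, text =>
    let i := PySem.Chars.find text bomb
    if i < 0 then text
    else pvLoopB bomb fuel
      (PySem.List.slice text none (some i) ++
       PySem.List.slice text (some (i + (bomb.length : Int))) none)

def solve_string_explosion_alt (text : String) (bomb : String) : String :=
  let t := pvLoopB bomb.toList (text.toList.length + 1) text.toList
  if t = [] then "FRULA" else String.ofList t

-- ===== PRECONDITION & SPEC =====
-- Pre_ excludes only the empty bomb, on which A raises IndexError at bomb[-1] (and B's while-loop
-- never terminates); A returns normally on every other input.
def Pre_solve_string_explosion (text : String) (bomb : String) : Prop := bomb ≠ ""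
instance (text : String) (bomb : String) : Decidable (Pre_solve_string_explosion text bomb) := by
  unfold Pre_solve_string_explosion; infer_instance

def pvWitness_solve_string_explosion : String × String := ("mirkovC4nizCC44", "C4")

def Spec_solve_string_explosion (text : String) (bomb : String) (out : String) : Prop := out = solve_string_explosion_alt text bomb
instance (text : String) (bomb : String) (out : String) : Decidable (Spec_solve_string_explosion text bomb out) := by unfold Spec_solve_string_explosion; infer_instance

-- ===== CLAIM (what is proved, stated in full; the proofs are below) =====
def Claim_equal_solve_string_explosion : Prop := ∀ (text : String) (bomb : String), Dom_solve_string_explosion text bomb → Pre_solve_string_explosion text bomb → Spec_solve_string_explosion text bomb (solve_string_explosion text bomb)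

-- ===== LEMMAS AND PROOFS =====

-- A clean description of A's loop body: delete the bomb iff it just became a suffix.
def pvStepC (b : List Char) (st : List Char) (x : Char) : List Char :=
  if b <:+ st ++ [x] then (st ++ [x]).take ((st ++ [x]).length - b.length) else st ++ [x]

lemma pvStepA_eq_stepC (b : List Char) (hb : b ≠ []) (st : List Char) (x : Char) :
    pvStepA b (b.getLast hb) st x = pvStepC b st x := by
  have hlen : 0 < b.length := List.length_pos_of_ne_nil hb
  simp only [pvStepA, pvStepC]
  rw [PySem.List.slice_from_neg_natCast _ _ hlen, PySem.List.slice_to_neg_natCast _ _ hlen]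
  by_cases hsuf : b <:+ st ++ [x]
  · obtain ⟨y, hy⟩ := hsuf
    have hx : x = b.getLast hb := by
      have h2 : (y ++ b).getLast? = some (b.getLast hb) := by
        rw [List.getLast?_eq_some_getLast (l := y ++ b) (by simp [hb]),
            List.getLast_append_of_ne_nil (by simp [hb]) hb]
      have h1 : (y ++ b).getLast? = some x := by rw [hy]; simp
      rw [h1] at h2
      exact Option.some.inj h2
    have hle : b.length ≤ (st ++ [x]).length := by
      rw [← hy]; simp
    rw [if_pos ⟨hx, by exact_mod_cast hle⟩,
        if_pos (List.suffix_iff_eq_drop.mp ⟨y, hy⟩).symm, if_pos ⟨y, hy⟩]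
  · rw [if_neg hsuf]
    by_cases hcond : x = b.getLast hb ∧ (b.length : Int) ≤ ((st ++ [x]).length : Int)
    · rw [if_pos hcond, if_neg]
      intro hdrop
      exact hsuf (List.suffix_iff_eq_drop.mpr hdrop.symm)
    · rw [if_neg hcond]

-- no-trigger run: while the bomb never becomes a suffix, the stack just accumulates
lemma pvFoldC_no_trigger (b : List Char) (t : List Char) :
    ∀ st, (∀ p, p <+: t → p ≠ [] → ¬ b <:+ st ++ p) →
    t.foldl (pvStepC b) st = st ++ t := by
  induction t with
  | nil => intro st _; simp
  | cons x t' ih =>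
    intro st h
    have hx : ¬ b <:+ st ++ [x] := h [x] ⟨t', rfl⟩ (by simp)
    have hstep : pvStepC b st x = st ++ [x] := if_neg hx
    have ih' : t'.foldl (pvStepC b) (st ++ [x]) = (st ++ [x]) ++ t' := by
      apply ih
      intro p hp hpne
      have : (st ++ [x]) ++ p = st ++ (x :: p) := by simp
      rw [this]
      exact h (x :: p) (by obtain ⟨r, hr⟩ := hp; exact ⟨r, by simp [hr]⟩) (by simp)
    simp only [List.foldl_cons, hstep, ih']
    simp

-- feeding exactly the bomb onto stack u deletes it again, provided no occurrence starts before |u|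
lemma pvFoldC_eat_bomb (b : List Char) (hb : b ≠ []) (u v : List Char)
    (h1 : ∀ j, j < u.length → ¬ b <+: (u ++ b ++ v).drop j) :
    b.foldl (pvStepC b) u = u := by
  have hlen : 0 < b.length := List.length_pos_of_ne_nil hb
  have hsplit : b.dropLast ++ [b.getLast hb] = b := List.dropLast_append_getLast hb
  -- no trigger while feeding b.dropLast
  have hfront : b.dropLast.foldl (pvStepC b) u = u ++ b.dropLast := by
    apply pvFoldC_no_trigger
    intro p hp hpne hsuf
    obtain ⟨w, hw⟩ := hsuf
    have hplen : p.length < b.length := by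
      have := hp.length_le
      have := b.length_dropLast
      omega
    have hblen : b.length ≤ u.length + p.length := by
      have : (u ++ p).length = (w ++ b).length := by rw [hw]
      simp at this; omega
    set j := u.length + p.length - b.length with hj
    have hjlt : j < u.length := by omega
    apply h1 j hjlt
    -- u ++ p is a prefix of u ++ b ++ v, and (u ++ p) = w ++ b with |w| = j
    obtain ⟨r, hr⟩ : (u ++ p) <+: (u ++ b ++ v) := by
      obtain ⟨q, hq⟩ := hp
      exact ⟨q ++ [b.getLast hb] ++ v, by
        have hre : u ++ p ++ (q ++ [b.getLast hb] ++ v) =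
            u ++ (p ++ q ++ [b.getLast hb]) ++ v := by simp
        rw [hre, hq, hsplit]⟩
    have hwlen : w.length = j := by
      have : (u ++ p).length = (w ++ b).length := by rw [hw]
      simp at this; omega
    rw [← hr, ← hw, List.append_assoc, ← hwlen, List.drop_left]
    exact ⟨r, rfl⟩
  -- the last character of b triggers the deletion
  have hlast : pvStepC b (u ++ b.dropLast) (b.getLast hb) = u := by
    unfold pvStepC
    rw [List.append_assoc, hsplit, if_pos ⟨u, rfl⟩]
    have : (u ++ b).length - b.length = u.length := by simp
    rw [this, List.take_left]
  calc b.foldl (pvStepC b) u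
      = (b.dropLast ++ [b.getLast hb]).foldl (pvStepC b) u := by rw [hsplit]
    _ = u := by rw [List.foldl_append, hfront]; simpa using hlast

-- deleting the LEFTMOST occurrence of b commutes with A's stack fold
lemma pvFoldC_delete_leftmost (b : List Char) (hb : b ≠ []) (u v : List Char)
    (h1 : ∀ j, j < u.length → ¬ b <+: (u ++ b ++ v).drop j) :
    (u ++ b ++ v).foldl (pvStepC b) [] = (u ++ v).foldl (pvStepC b) [] := by
  have hlen : 0 < b.length := List.length_pos_of_ne_nil hb
  have hu : u.foldl (pvStepC b) [] = u := by
    have := pvFoldC_no_trigger b u [] (by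
      intro p hp hpne hsuf
      obtain ⟨w, hw⟩ := hsuf
      simp only [List.nil_append] at hw
      have hplen : p.length ≤ u.length := hp.length_le
      have hwlen : w.length = p.length - b.length := by
        have : p.length = (w ++ b).length := by rw [hw]
        simp at this; omega
      have hble : b.length ≤ p.length := by
        have : p.length = (w ++ b).length := by rw [hw]
        simp at this; omega
      set j := p.length - b.length with hj
      have hjlt : j < u.length := by
        have : p ≠ [] := hpne
        have : 0 < p.length := List.length_pos_of_ne_nil hpne
        omega
      apply h1 j hjlt
      obtain ⟨r, hr⟩ : p <+: (u ++ b ++ v) := by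
        obtain ⟨q, hq⟩ := hp
        exact ⟨q ++ b ++ v, by rw [← hq]; simp⟩
      rw [← hr, ← hw, List.append_assoc, ← hwlen, List.drop_left]
      exact ⟨r, rfl⟩)
    simpa using this
  rw [List.append_assoc]
  rw [List.foldl_append, List.foldl_append, hu, List.foldl_append, hu,
      pvFoldC_eat_bomb b hb u v h1]

-- a bomb-free string is a fixed point of the fold
lemma pvFoldC_of_not_infix (b : List Char) (t : List Char) (h : ¬ b <:+: t) :
    t.foldl (pvStepC b) [] = t := by
  have := pvFoldC_no_trigger b t [] (by
    intro p hp _ hsuf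
    simp only [List.nil_append] at hsuf
    exact h (hsuf.isInfix.trans hp.isInfix))
  simpa using this

-- main loop correspondence
lemma pvFoldC_eq_loopB (b : List Char) (hb : b ≠ []) :
    ∀ fuel t, t.length < fuel → t.foldl (pvStepC b) [] = pvLoopB b fuel t := by
  intro fuel
  induction fuel with
  | zero => intro t ht; omega
  | succ n ih =>
    intro t ht
    by_cases hi : PySem.Chars.find t b < 0
    · rw [pvLoopB, if_pos hi]
      apply pvFoldC_of_not_infix
      intro hinf
      have := PySem.Chars.find_nonneg_iff (s := t) (sub := b) |>.mpr hinf
      omega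
    · rw [not_lt] at hi
      obtain ⟨hpre, hmin⟩ := PySem.Chars.find_spec (s := t) (sub := b) hi
      set i := PySem.Chars.find t b with hidef
      set k := i.toNat with hk
      obtain ⟨v, hv⟩ := hpre
      set u := t.take k with hu
      have hlen : 0 < b.length := List.length_pos_of_ne_nil hb
      have hkt : k ≤ t.length := by
        have := PySem.Chars.find_le_length t b
        omega
      have hkle : k + b.length ≤ t.length := by
        have : (t.drop k).length = (b ++ v).length := by rw [hv]
        simp at this
        omega
      have hulen : u.length = k := by
        simp [hu]; omega
      have ht' : t = u ++ b ++ v := by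
        rw [List.append_assoc, hv, hu, List.take_append_drop]
      have h1 : ∀ j, j < u.length → ¬ b <+: (u ++ b ++ v).drop j := by
        intro j hj
        rw [← ht']
        exact hmin j (by omega)
      have hnew : PySem.List.slice t none (some i) ++
          PySem.List.slice t (some (i + (b.length : Int))) none = u ++ v := by
        rw [PySem.List.slice_to t hi, PySem.List.slice_from t (by positivity)]
        congr 1
        have : (i + (b.length : Int)).toNat = k + b.length := by omega
        rw [this, ht']
        have : k + b.length = (u ++ b).length := by simp [hulen]
        rw [this, List.drop_left]
      rw [pvLoopB, if_neg (by omega)]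
      simp only [← hidef, hnew]
      rw [ht', pvFoldC_delete_leftmost b hb u v h1]
      apply ih
      have : (u ++ v).length = k + v.length := by simp [hulen]
      have htlen : t.length = k + b.length + v.length := by
        rw [ht']; simp [hulen]; omega
      omega

-- ===== VERDICT (by name: the statement is the Claim_ definition above) =====
theorem solve_string_explosion_spec : Claim_equal_solve_string_explosion := by
  intro text bomb _ hpre
  have hb : bomb.toList ≠ [] := by
    simp only [ne_eq, String.toList_eq_nil_iff]
    exact hpre
  unfold Spec_solve_string_explosion solve_string_explosion solve_string_explosion_alt
  have hget : PySem.Str.pyGet? bomb (-1) = some (bomb.toList.getLast hb) := by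
    simp [PySem.List.pyGet?_neg_one, List.getLast?_eq_some_getLast hb]
  rw [hget]
  have hfun : pvStepA bomb.toList (bomb.toList.getLast hb) = pvStepC bomb.toList := by
    funext st x
    exact pvStepA_eq_stepC bomb.toList hb st x
  simp only [hfun]
  rw [pvFoldC_eq_loopB bomb.toList hb (text.toList.length + 1) text.toList (by omega)]
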